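-- pv_equiv track=rewrite | github.com/bdevz/og-system | agents/rick/workspace/skills/positioning/keyword_planter.py | _find_equivalent
-- ===== SOURCE A (Python) =====
-- EQUIVALENCY_MAP = {
--     "airflow": ["step_functions", "stepfunctions", "prefect", "dbt", "orchestration"],
--     "step_functions": ["airflow", "prefect", "stepfunctions", "orchestration"],
--     "jenkins": ["gitlab_ci", "gitlab-ci", "gitlabci", "circleci", "github_actions", "githubactions"],
--     "gitlab_ci": ["jenkins", "circleci", "github_actions", "githubactions", "azure_devops"],
--     "kubernetes": ["k8s", "docker_swarm", "dockerswarm", "openshift", "ecs"],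
--     "docker": ["podman", "containers", "containerization"],
--     "spark": ["pyspark", "scala_spark", "hadoop", "mllib"],
--     "pyspark": ["spark", "scala_spark"],
--     "terraform": ["cloudformation", "cloud_formation", "ansible", "pulumi", "iac"],
--     "cloudformation": ["terraform", "cloud_formation", "ansible", "pulumi"],
--     "aws": ["gcp", "google_cloud", "azure", "cloud_platform", "ec2", "lambda"],
--     "gcp": ["aws", "google_cloud", "azure", "cloud_platform", "bigquery"],
--     "azure": ["aws", "gcp", "azure_devops", "cloud_platform"],
--     "react": ["vue", "angular", "svelte", "frontend", "javascript"],
--     "vue": ["react", "angular", "svelte", "frontend"],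
--     "angular": ["react", "vue", "frontend", "typescript"],
--     "postgres": ["postgresql", "mysql", "mariadb", "oracle", "relational", "sql"],
--     "mysql": ["postgres", "postgresql", "mariadb", "relational", "sql"],
--     "mongodb": ["dynamodb", "dynamodb", "cassandra", "nosql", "documentdb"],
--     "dynamodb": ["mongodb", "cassandra", "nosql", "table_storage"],
--     "python": ["java", "go", "rust", "backend"],
--     "java": ["python", "go", "kotlin", "backend"],
--     "spring": ["spring_boot", "springboot", "quarkus", "micronaut"],
--     "spring_boot": ["spring", "springboot", "quarkus", "micronaut"],
--     "docker": ["containers", "containerd", "podman"],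
--     "helm": ["kustomize", "argocd", "deployment", "kubernetes"],
-- }
--
-- def _find_equivalent(job_keyword: str, candidate_skills: list) -> str:
--     """
--     Find if candidate has an equivalent skill to the job keyword.
--     Returns the candidate skill if found, None otherwise.
--     """
--     # Normalize job keyword
--     normalized_keyword = job_keyword.replace(" ", "_").replace("-", "_").lower()
--
--     # Check direct equivalency mappings
--     if normalized_keyword in EQUIVALENCY_MAP:
--         candidates = EQUIVALENCY_MAP[normalized_keyword]
--         for candidate_skill in candidate_skills:
--             normalized_skill = candidate_skill.replace(" ", "_").replace("-", "_").lower()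
--             if normalized_skill in candidates or normalized_skill == normalized_keyword:
--                 return candidate_skill
--
--     # Reverse lookup
--     for base_skill, equivalents in EQUIVALENCY_MAP.items():
--         if normalized_keyword in equivalents:
--             for candidate_skill in candidate_skills:
--                 normalized_skill = candidate_skill.replace(" ", "_").replace("-", "_").lower()
--                 if normalized_skill == base_skill:
--                     return candidate_skill
--
--     return None
-- ===== SOURCE B (Python) =====
-- EQUIVALENCY_MAP = {
--     "airflow": ["step_functions", "stepfunctions", "prefect", "dbt", "orchestration"],
--     "step_functions": ["airflow", "prefect", "stepfunctions", "orchestration"],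
--     "jenkins": ["gitlab_ci", "gitlab-ci", "gitlabci", "circleci", "github_actions", "githubactions"],
--     "gitlab_ci": ["jenkins", "circleci", "github_actions", "githubactions", "azure_devops"],
--     "kubernetes": ["k8s", "docker_swarm", "dockerswarm", "openshift", "ecs"],
--     "docker": ["podman", "containers", "containerization"],
--     "spark": ["pyspark", "scala_spark", "hadoop", "mllib"],
--     "pyspark": ["spark", "scala_spark"],
--     "terraform": ["cloudformation", "cloud_formation", "ansible", "pulumi", "iac"],
--     "cloudformation": ["terraform", "cloud_formation", "ansible", "pulumi"],
--     "aws": ["gcp", "google_cloud", "azure", "cloud_platform", "ec2", "lambda"],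
--     "gcp": ["aws", "google_cloud", "azure", "cloud_platform", "bigquery"],
--     "azure": ["aws", "gcp", "azure_devops", "cloud_platform"],
--     "react": ["vue", "angular", "svelte", "frontend", "javascript"],
--     "vue": ["react", "angular", "svelte", "frontend"],
--     "angular": ["react", "vue", "frontend", "typescript"],
--     "postgres": ["postgresql", "mysql", "mariadb", "oracle", "relational", "sql"],
--     "mysql": ["postgres", "postgresql", "mariadb", "relational", "sql"],
--     "mongodb": ["dynamodb", "dynamodb", "cassandra", "nosql", "documentdb"],
--     "dynamodb": ["mongodb", "cassandra", "nosql", "table_storage"],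
--     "python": ["java", "go", "rust", "backend"],
--     "java": ["python", "go", "kotlin", "backend"],
--     "spring": ["spring_boot", "springboot", "quarkus", "micronaut"],
--     "spring_boot": ["spring", "springboot", "quarkus", "micronaut"],
--     "docker": ["containers", "containerd", "podman"],
--     "helm": ["kustomize", "argocd", "deployment", "kubernetes"],
-- }
--
--
-- def _normalize(s: str) -> str:
--     return s.replace(" ", "_").replace("-", "_").lower()
--
--
-- def _build_reverse_index():
--     """Map each equivalent token to the ordered list of base skills listing it."""
--     index = {}
--     for base_skill, equivalents in EQUIVALENCY_MAP.items():
--         for token in equivalents: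
--             bucket = index.setdefault(token, [])
--             if base_skill not in bucket:
--                 bucket.append(base_skill)
--     return index
--
--
-- REVERSE_INDEX = _build_reverse_index()
--
--
-- def _find_equivalent(job_keyword: str, candidate_skills: list) -> str:
--     # Single pass over the candidates: remember the first direct hit and the
--     # reverse hit whose base skill comes earliest in map order (minimum rank).
--     nk = _normalize(job_keyword)
--     direct_eqs = EQUIVALENCY_MAP.get(nk)
--     bases = REVERSE_INDEX.get(nk, [])
--     direct = None
--     best = None  # (rank of base in `bases`, candidate)
--     for c in candidate_skills:
--         ns = _normalize(c)
--         if direct is None and direct_eqs is not None and (ns in direct_eqs or ns == nk):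
--             direct = c
--         if ns in bases:
--             r = bases.index(ns)
--             if best is None or r < best[0]:
--                 best = (r, c)
--     if direct is not None:
--         return direct
--     return best[1] if best is not None else None
-- ===== Notes on version B (the rewrite author's own statement) =====
-- stated objective: alternative
-- what changed: A's staged search (direct candidate scan, then a full scan of EQUIVALENCY_MAP with an inner candidate loop per matching base) is replaced by a precomputed reverse index (token -> ordered base skills) and a SINGLE pass over the candidates that accumulates the first direct hit and the minimum-rank reverse hit, returning direct first, else the best-ranked reverse candidate.
import Mathlib
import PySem

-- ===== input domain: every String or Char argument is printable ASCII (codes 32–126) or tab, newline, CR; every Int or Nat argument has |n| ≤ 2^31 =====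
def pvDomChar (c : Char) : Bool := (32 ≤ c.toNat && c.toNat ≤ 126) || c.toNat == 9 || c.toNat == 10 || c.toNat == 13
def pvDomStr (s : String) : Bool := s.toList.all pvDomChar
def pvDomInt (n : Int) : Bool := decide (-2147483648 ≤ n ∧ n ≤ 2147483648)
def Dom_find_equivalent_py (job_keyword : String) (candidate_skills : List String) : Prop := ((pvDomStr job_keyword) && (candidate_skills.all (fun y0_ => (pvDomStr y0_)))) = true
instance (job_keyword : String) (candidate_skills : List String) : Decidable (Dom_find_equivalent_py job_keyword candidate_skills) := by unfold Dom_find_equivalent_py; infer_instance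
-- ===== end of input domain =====

-- B replaces A's staged nested loops (direct scan, then a full map scan with an inner candidate
-- loop) by ONE pass over the candidates with an accumulator (first direct hit + minimum-rank
-- reverse hit against a precomputed reverse index); return values proved equal on all inputs.

-- Python dict literal (duplicate key "docker": later value wins, position kept) as an insertion-ordered Dict
def EQUIVALENCY_MAP : PySem.Dict String (List String) := PySem.Dict.ofList [
  ("airflow", ["step_functions", "stepfunctions", "prefect", "dbt", "orchestration"]),
  ("step_functions", ["airflow", "prefect", "stepfunctions", "orchestration"]),
  ("jenkins", ["gitlab_ci", "gitlab-ci", "gitlabci", "circleci", "github_actions", "githubactions"]),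
  ("gitlab_ci", ["jenkins", "circleci", "github_actions", "githubactions", "azure_devops"]),
  ("kubernetes", ["k8s", "docker_swarm", "dockerswarm", "openshift", "ecs"]),
  ("docker", ["podman", "containers", "containerization"]),
  ("spark", ["pyspark", "scala_spark", "hadoop", "mllib"]),
  ("pyspark", ["spark", "scala_spark"]),
  ("terraform", ["cloudformation", "cloud_formation", "ansible", "pulumi", "iac"]),
  ("cloudformation", ["terraform", "cloud_formation", "ansible", "pulumi"]),
  ("aws", ["gcp", "google_cloud", "azure", "cloud_platform", "ec2", "lambda"]),
  ("gcp", ["aws", "google_cloud", "azure", "cloud_platform", "bigquery"]),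
  ("azure", ["aws", "gcp", "azure_devops", "cloud_platform"]),
  ("react", ["vue", "angular", "svelte", "frontend", "javascript"]),
  ("vue", ["react", "angular", "svelte", "frontend"]),
  ("angular", ["react", "vue", "frontend", "typescript"]),
  ("postgres", ["postgresql", "mysql", "mariadb", "oracle", "relational", "sql"]),
  ("mysql", ["postgres", "postgresql", "mariadb", "relational", "sql"]),
  ("mongodb", ["dynamodb", "dynamodb", "cassandra", "nosql", "documentdb"]),
  ("dynamodb", ["mongodb", "cassandra", "nosql", "table_storage"]),
  ("python", ["java", "go", "rust", "backend"]),
  ("java", ["python", "go", "kotlin", "backend"]),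
  ("spring", ["spring_boot", "springboot", "quarkus", "micronaut"]),
  ("spring_boot", ["spring", "springboot", "quarkus", "micronaut"]),
  ("docker", ["containers", "containerd", "podman"]),
  ("helm", ["kustomize", "argocd", "deployment", "kubernetes"])]

-- normalized = s.replace(" ", "_").replace("-", "_").lower()
def pvNorm (s : String) : String :=
  PySem.Str.lower (PySem.Str.replace (PySem.Str.replace s " " "_") "-" "_")

-- ===== PORT A =====
-- for candidate_skill in candidate_skills: if normalized in candidates or normalized == keyword: return it
def pvFindDirectA (nk : String) (cands : List String) (cs : List String) : Option String :=
  match cs with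
  | [] => none
  | c :: rest =>
    let ns := pvNorm c
    if ns ∈ cands ∨ ns = nk then some c else pvFindDirectA nk cands rest

-- inner loop of the reverse lookup: first candidate whose normalized form equals base
def pvFindBaseA (base : String) (cs : List String) : Option String :=
  match cs with
  | [] => none
  | c :: rest => if pvNorm c = base then some c else pvFindBaseA base rest

-- for base_skill, equivalents in EQUIVALENCY_MAP.items(): if keyword in equivalents: inner loop
def pvReverseScanA (nk : String) (entries : List (String × List String)) (cs : List String) : Option String :=
  match entries with
  | [] => none
  | e :: rest =>
    if nk ∈ e.2 then
      match pvFindBaseA e.1 cs with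
      | some c => some c
      | none => pvReverseScanA nk rest cs
    else pvReverseScanA nk rest cs

def find_equivalent_py (job_keyword : String) (candidate_skills : List String) : Option String :=
  let nk := pvNorm job_keyword
  let direct :=
    match PySem.Dict.get? EQUIVALENCY_MAP nk with
    | some cands => pvFindDirectA nk cands candidate_skills
    | none => none
  match direct with
  | some c => some c
  | none => pvReverseScanA nk EQUIVALENCY_MAP.items candidate_skills

-- ===== PORT B =====
-- loop body: bucket = idx.setdefault(token, []); if base not in bucket: bucket.append(base)
def pvIdxTokStep (base : String) (idx : PySem.Dict String (List String)) (tok : String) :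
    PySem.Dict String (List String) :=
  let idx := PySem.Dict.setdefault idx tok []
  let bucket := PySem.Dict.getD idx tok []
  if base ∈ bucket then idx else PySem.Dict.insert idx tok (bucket ++ [base])

-- for token in equivalents: …
def pvInnerLoop (base : String) (eqs : List String) (idx : PySem.Dict String (List String)) :
    PySem.Dict String (List String) :=
  eqs.foldl (pvIdxTokStep base) idx

def pvBuildReverseIndex : PySem.Dict String (List String) :=
  EQUIVALENCY_MAP.items.foldl (fun idx e => pvInnerLoop e.1 e.2 idx) PySem.Dict.empty

def REVERSE_INDEX : PySem.Dict String (List String) := pvBuildReverseIndex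

-- if direct is None and direct_eqs is not None and (ns in direct_eqs or ns == nk): direct = c
def pvDirectStep (eqs? : Option (List String)) (nk : String) (d : Option String) (c : String) : Option String :=
  match d with
  | some x => some x
  | none =>
    match eqs? with
    | some eqs => if eqs.contains (pvNorm c) || pvNorm c == nk then some c else d
    | none => d

-- if ns in bases: r = bases.index(ns); if best is None or r < best[0]: best = (r, c)
def pvRankStep (bases : List String) (best : Option (Nat × String)) (c : String) : Option (Nat × String) :=
  match PySem.List.index? bases (pvNorm c) with
  | none => best
  | some r =>
    match best with
    | none => some (r, c)
    | some (r0, c0) => if r < r0 then some (r, c) else some (r0, c0)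

def find_equivalent_py_alt (job_keyword : String) (candidate_skills : List String) : Option String :=
  let nk := pvNorm job_keyword
  let eqs? := PySem.Dict.get? EQUIVALENCY_MAP nk
  let bases := PySem.Dict.getD REVERSE_INDEX nk []
  let st := candidate_skills.foldl
    (fun (s : Option String × Option (Nat × String)) c =>
      (pvDirectStep eqs? nk s.1 c, pvRankStep bases s.2 c)) (none, none)
  match st.1 with
  | some c => some c
  | none => st.2.map Prod.snd

-- ===== PRECONDITION & SPEC =====
def Spec_find_equivalent_py (job_keyword : String) (candidate_skills : List String) (out : Option String) : Prop := out = find_equivalent_py_alt job_keyword candidate_skills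
instance (job_keyword : String) (candidate_skills : List String) (out : Option String) : Decidable (Spec_find_equivalent_py job_keyword candidate_skills out) := by unfold Spec_find_equivalent_py; infer_instance

-- ===== CLAIM (what is proved, stated in full; the proofs are below) =====
def Claim_equal_find_equivalent_py : Prop := ∀ (job_keyword : String) (candidate_skills : List String), Dom_find_equivalent_py job_keyword candidate_skills → Spec_find_equivalent_py job_keyword candidate_skills (find_equivalent_py job_keyword candidate_skills)

-- ===== LEMMAS AND PROOFS =====

-- the pair fold of B splits into two independent folds
theorem foldl_pair {α β σ : Type} (f : α → σ → α) (g : β → σ → β) (a : α) (b : β) (l : List σ) :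
    l.foldl (fun s c => (f s.1 c, g s.2 c)) (a, b) = (l.foldl f a, l.foldl g b) := by
  induction l generalizing a b with
  | nil => rfl
  | cons c rest ih => simp [List.foldl_cons, ih]

theorem directStep_keeps (eqs? : Option (List String)) (nk x : String) (cs : List String) :
    cs.foldl (pvDirectStep eqs? nk) (some x) = some x := by
  induction cs with
  | nil => rfl
  | cons c rest ih => simpa [pvDirectStep] using ih

theorem direct_fold_none (nk : String) (cs : List String) :
    cs.foldl (pvDirectStep none nk) none = none := by
  induction cs with
  | nil => rfl
  | cons c rest ih => simpa [pvDirectStep] using ih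

theorem direct_fold_some (nk : String) (eqs cs : List String) :
    cs.foldl (pvDirectStep (some eqs) nk) none
      = pvFindDirectA nk eqs cs := by
  induction cs with
  | nil => rfl
  | cons c rest ih =>
    simp only [List.foldl_cons, pvDirectStep, pvFindDirectA]
    by_cases h : pvNorm c ∈ eqs ∨ pvNorm c = nk
    · rw [if_pos (by simpa using h), if_pos h, directStep_keeps]
    · rw [if_neg (by simpa using h), if_neg h, ih]

-- a rank-0 best is never replaced
theorem rank_keep_zero (bases : List String) (c : String) (cs : List String) :
    cs.foldl (pvRankStep bases) (some (0, c)) = some (0, c) := by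
  induction cs with
  | nil => rfl
  | cons c' rest ih =>
    simp only [List.foldl_cons, pvRankStep]
    cases PySem.List.index? bases (pvNorm c') with
    | none => exact ih
    | some r => simpa using ih

-- if some candidate matches the head base b, the fold (from an empty or positive-rank state)
-- ends at rank 0 with the FIRST such candidate
theorem rank_zero_found (b : String) (bs cs : List String) (cStar : String)
    (hf : cs.find? (fun c => pvNorm c == b) = some cStar) :
    ∀ best : Option (Nat × String),
      (best = none ∨ ∃ k c0, best = some (k, c0) ∧ 0 < k) →
      cs.foldl (pvRankStep (b :: bs)) best = some (0, cStar) := by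
  induction cs with
  | nil => simp at hf
  | cons c rest ih =>
    intro best hP
    simp only [List.foldl_cons]
    by_cases h : pvNorm c = b
    · rw [List.find?_cons_of_pos (by simpa using h)] at hf
      obtain rfl : c = cStar := by simpa using hf
      have hidx : PySem.List.index? (b :: bs) (pvNorm c) = some 0 := by
        rw [h]; exact PySem.List.index?_cons_self b bs
      have hstep : pvRankStep (b :: bs) best c = some (0, c) := by
        rcases hP with rfl | ⟨k, c0, rfl, hk⟩
        · simp only [pvRankStep]; rw [hidx]
        · simp only [pvRankStep]; rw [hidx]; simp [hk]
      rw [hstep, rank_keep_zero]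
    · rw [List.find?_cons_of_neg (by simpa using h)] at hf
      apply ih hf
      have hidx : PySem.List.index? (b :: bs) (pvNorm c)
          = (PySem.List.index? bs (pvNorm c)).map (· + 1) :=
        PySem.List.index?_cons_of_ne bs (fun hc => h hc.symm)
      cases hbsi : PySem.List.index? bs (pvNorm c) with
      | none =>
        rw [show pvRankStep (b :: bs) best c = best by
          simp only [pvRankStep]; rw [hidx, hbsi]; rfl]
        exact hP
      | some r =>
        rcases hP with rfl | ⟨k, c0, rfl, hk⟩
        · exact Or.inr ⟨r + 1, c, by simp only [pvRankStep]; rw [hidx, hbsi]; rfl, by omega⟩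
        · have hred : pvRankStep (b :: bs) (some (k, c0)) c
              = if r + 1 < k then some (r + 1, c) else some (k, c0) := by
            simp only [pvRankStep]; rw [hidx, hbsi]; rfl
          rw [hred]
          split_ifs with hlt
          · exact Or.inr ⟨r + 1, c, rfl, by omega⟩
          · exact Or.inr ⟨k, c0, rfl, hk⟩

-- if no candidate matches b, ranks against (b :: bs) are the bs-ranks shifted by one
theorem rank_shift (b : String) (bs cs : List String)
    (h : ∀ c ∈ cs, pvNorm c ≠ b) (best : Option (Nat × String)) :
    cs.foldl (pvRankStep (b :: bs)) (best.map (fun p => (p.1 + 1, p.2)))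
      = (cs.foldl (pvRankStep bs) best).map (fun p => (p.1 + 1, p.2)) := by
  induction cs generalizing best with
  | nil => rfl
  | cons c rest ih =>
    have hc : pvNorm c ≠ b := h c List.mem_cons_self
    have hrest : ∀ c' ∈ rest, pvNorm c' ≠ b := fun c' hm => h c' (List.mem_cons_of_mem _ hm)
    simp only [List.foldl_cons]
    have hidx : PySem.List.index? (b :: bs) (pvNorm c)
        = (PySem.List.index? bs (pvNorm c)).map (· + 1) :=
      PySem.List.index?_cons_of_ne bs (fun hc' => hc hc'.symm)
    have hstep : pvRankStep (b :: bs) (best.map (fun p => (p.1 + 1, p.2))) c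
        = (pvRankStep bs best c).map (fun p => (p.1 + 1, p.2)) := by
      cases hbsi : PySem.List.index? bs (pvNorm c) with
      | none => simp only [pvRankStep]; rw [hidx, hbsi]; rfl
      | some r =>
        cases best with
        | none => simp only [pvRankStep]; rw [hidx, hbsi]; rfl
        | some p =>
          obtain ⟨r0, c0⟩ := p
          simp only [pvRankStep, Option.map_some]
          rw [hidx, hbsi]
          simp only [Option.map_some]
          have hiff : (r + 1 < r0 + 1) ↔ (r < r0) := by omega
          split_ifs with h1 h2 h2 <;> simp_all
    rw [hstep, ih hrest]

-- an empty base list leaves the accumulator untouched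
theorem rank_fold_nil (cs : List String) (best : Option (Nat × String)) :
    cs.foldl (pvRankStep []) best = best := by
  induction cs generalizing best with
  | nil => rfl
  | cons c rest ih =>
    have : PySem.List.index? ([] : List String) (pvNorm c) = none := by
      rw [PySem.List.index?_eq_none_iff]; simp
    simp only [List.foldl_cons, pvRankStep, this]
    exact ih best

-- MAIN rank lemma: the minimum-rank single pass equals the base-major first-match search
theorem rank_fold_eq (bases cs : List String) :
    (cs.foldl (pvRankStep bases) none).map Prod.snd
      = bases.findSome? (fun b => cs.find? (fun c => pvNorm c == b)) := by
  induction bases generalizing cs with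
  | nil => simp [rank_fold_nil]
  | cons b bs ih =>
    cases hf : cs.find? (fun c => pvNorm c == b) with
    | some cStar =>
      rw [rank_zero_found b bs cs cStar hf none (Or.inl rfl)]
      simp [List.findSome?, hf]
    | none =>
      have hno : ∀ c ∈ cs, pvNorm c ≠ b := by
        intro c hm hc
        have := List.find?_eq_none.mp hf c hm
        simp [hc] at this
      have := rank_shift b bs cs hno none
      simp only [Option.map_none] at this
      rw [this]
      have : ∀ o : Option (Nat × String),
          (o.map (fun p => (p.1 + 1, p.2))).map Prod.snd = o.map Prod.snd := by
        intro o; cases o <;> rfl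
      rw [this, ih cs]
      simp [List.findSome?, hf]

-- ---- A-side characterisations ----
theorem direct_eq (nk : String) (cands cs : List String) :
    pvFindDirectA nk cands cs = cs.find? (fun c => cands.contains (pvNorm c) || pvNorm c == nk) := by
  induction cs with
  | nil => rfl
  | cons c rest ih =>
    simp only [pvFindDirectA]
    by_cases h : pvNorm c ∈ cands ∨ pvNorm c = nk
    · rw [if_pos h, List.find?_cons_of_pos (by simpa using h)]
    · rw [if_neg h, List.find?_cons_of_neg (by simpa using h), ih]

theorem base_eq (b : String) (cs : List String) :
    pvFindBaseA b cs = cs.find? (fun c => pvNorm c == b) := by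
  induction cs with
  | nil => rfl
  | cons c rest ih =>
    simp only [pvFindBaseA]
    by_cases h : pvNorm c = b
    · rw [if_pos h, List.find?_cons_of_pos (by simpa using h)]
    · rw [if_neg h, List.find?_cons_of_neg (by simpa using h), ih]

theorem scan_eq (nk : String) (entries : List (String × List String)) (cs : List String) :
    pvReverseScanA nk entries cs =
      ((entries.filter (fun e => decide (nk ∈ e.2))).map Prod.fst).findSome?
        (fun b => pvFindBaseA b cs) := by
  induction entries with
  | nil => rfl
  | cons e rest ih =>
    simp only [pvReverseScanA, List.filter]
    by_cases h : nk ∈ e.2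
    · simp only [h, decide_true, List.map_cons, List.findSome?]
      cases pvFindBaseA e.1 cs <;> simp [ih]
    · simp [h, ih]

-- ---- REVERSE_INDEX characterisation ----
-- setdefault with the default [] never changes a [] -defaulted lookup
theorem getD_setdefault_nil (idx : PySem.Dict String (List String)) (tok nk : String) :
    PySem.Dict.getD (PySem.Dict.setdefault idx tok []) nk [] = PySem.Dict.getD idx nk [] := by
  by_cases h : nk = tok
  · subst h; exact PySem.Dict.getD_setdefault_self idx nk [] []
  · rw [PySem.Dict.getD_eq_get?_getD, PySem.Dict.get?_setdefault_of_ne idx [] h,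
        ← PySem.Dict.getD_eq_get?_getD]

-- one token step appends the base once to that token's bucket
theorem getD_step (base tok nk : String) (idx : PySem.Dict String (List String)) :
    PySem.Dict.getD (pvIdxTokStep base idx tok) nk []
      = PySem.Dict.getD idx nk [] ++
          (if nk = tok ∧ base ∉ PySem.Dict.getD idx nk [] then [base] else []) := by
  have hb : PySem.Dict.getD (PySem.Dict.setdefault idx tok []) tok [] = PySem.Dict.getD idx tok [] :=
    PySem.Dict.getD_setdefault_self idx tok [] []
  simp only [pvIdxTokStep]
  rw [hb]
  by_cases h : nk = tok
  · subst h
    by_cases hmem : base ∈ PySem.Dict.getD idx nk []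
    · rw [if_pos hmem, getD_setdefault_nil]
      simp [hmem]
    · rw [if_neg hmem, PySem.Dict.getD_insert]
      simp [hmem]
  · by_cases hmem : base ∈ PySem.Dict.getD idx tok []
    · rw [if_pos hmem, getD_setdefault_nil]
      simp [h]
    · rw [if_neg hmem, PySem.Dict.getD_insert, if_neg h, getD_setdefault_nil]
      simp [h]

-- the inner token loop appends the base once to the bucket of each token of eqs
theorem inner_invariant (base : String) (eqs : List String)
    (idx : PySem.Dict String (List String)) (nk : String) :
    PySem.Dict.getD (pvInnerLoop base eqs idx) nk []
    = PySem.Dict.getD idx nk [] ++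
        (if nk ∈ eqs ∧ base ∉ PySem.Dict.getD idx nk [] then [base] else []) := by
  induction eqs generalizing idx with
  | nil => simp [pvInnerLoop]
  | cons tok rest ih =>
    simp only [pvInnerLoop, List.foldl_cons] at ih ⊢
    rw [ih, getD_step]
    by_cases h : nk = tok <;> by_cases hbm : base ∈ PySem.Dict.getD idx nk [] <;>
      simp [h, hbm, List.mem_cons]

-- the outer loop over fresh, distinct base skills appends each base to the buckets of its tokens
theorem outer_invariant (entries : List (String × List String))
    (idx : PySem.Dict String (List String))
    (hfresh : ∀ e ∈ entries, ∀ k, e.1 ∉ PySem.Dict.getD idx k [])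
    (hnd : (entries.map Prod.fst).Nodup) (nk : String) :
    PySem.Dict.getD (entries.foldl (fun idx e => pvInnerLoop e.1 e.2 idx) idx) nk []
    = PySem.Dict.getD idx nk [] ++
        (entries.filter (fun e => decide (nk ∈ e.2))).map Prod.fst := by
  induction entries generalizing idx with
  | nil => simp
  | cons e rest ih =>
    simp only [List.foldl_cons, List.map_cons, List.nodup_cons] at hnd ⊢
    have hstep : ∀ k, PySem.Dict.getD (pvInnerLoop e.1 e.2 idx) k []
        = PySem.Dict.getD idx k [] ++ (if k ∈ e.2 then [e.1] else []) := by
      intro k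
      rw [inner_invariant]
      simp [hfresh e (List.mem_cons_self) k]
    rw [ih _ ?_ hnd.2, hstep]
    · by_cases h : nk ∈ e.2 <;> simp [h]
    · intro e' he' k
      rw [hstep k]
      have h1 : e'.1 ∉ PySem.Dict.getD idx k [] := hfresh e' (List.mem_cons_of_mem _ he') k
      have h2 : e'.1 ≠ e.1 := by
        intro hc
        exact hnd.1 (hc ▸ (List.mem_map.mpr ⟨e', he', rfl⟩))
      by_cases h : k ∈ e.2 <;> simp [h, h1, h2]

theorem key_lemma (nk : String) :
    PySem.Dict.getD REVERSE_INDEX nk [] =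
      (EQUIVALENCY_MAP.items.filter (fun e => decide (nk ∈ e.2))).map Prod.fst := by
  unfold REVERSE_INDEX pvBuildReverseIndex
  rw [outer_invariant]
  · simp [PySem.Dict.getD_empty]
  · intro e _ k
    simp [PySem.Dict.getD_empty]
  · simpa [PySem.Dict.keys] using PySem.Dict.nodup_keys_ofList (κ := String) (ν := List String) _

-- ===== VERDICT (by name: the statement is the Claim_ definition above) =====
theorem find_equivalent_py_spec : Claim_equal_find_equivalent_py := by
  intro jk cs _
  unfold Spec_find_equivalent_py find_equivalent_py find_equivalent_py_alt
  simp only [foldl_pair]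
  rw [rank_fold_eq, key_lemma, scan_eq]
  cases PySem.Dict.get? EQUIVALENCY_MAP (pvNorm jk) with
  | none => simp only [direct_fold_none, base_eq]
  | some cands => simp only [direct_fold_some, direct_eq, base_eq]
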